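-- pv_equiv track=rewrite | github.com/Schaudge/indelPost | indelpost/utilities.py | to_minimal_repeat_unit
-- ===== SOURCE A (Python) =====
-- def to_minimal_repeat_unit(seq):
--     """Find repeat unit in indel sequence
--     """
--     mid = int(len(seq) / 2)
--     min_unit = seq
--
--     j = 1
--     found = False
--
--     while j <= mid and not found:
--         tandems = [seq[i : i + j] for i in range(0, len(seq), j)]
--         if len(set(tandems)) == 1:
--             found = True
--             min_unit = list(set(tandems))[0]
--         j += 1
--
--     return min_unit
-- ===== SOURCE B (Python) =====
-- def to_minimal_repeat_unit(seq):
--     """Find repeat unit in indel sequence (divisor scan: only unit lengths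
--     dividing len(seq) can tile it, so test those with one string comparison)."""
--     n = len(seq)
--     for j in range(1, n // 2 + 1):
--         if n % j == 0 and seq[:j] * (n // j) == seq:
--             return seq[:j]
--     return seq
-- ===== Notes on version B (the rewrite author's own statement) =====
-- stated objective: faster
-- what changed: A tests every candidate unit length j by slicing the sequence into chunks and deduplicating them via a set (O(n) work per j, O(n^2) total); B observes that only divisors of len(seq) can tile it, so it skips non-divisors with an O(1) modulo test and compares seq[:j]*(n//j) == seq only at divisors.
import Mathlib
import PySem

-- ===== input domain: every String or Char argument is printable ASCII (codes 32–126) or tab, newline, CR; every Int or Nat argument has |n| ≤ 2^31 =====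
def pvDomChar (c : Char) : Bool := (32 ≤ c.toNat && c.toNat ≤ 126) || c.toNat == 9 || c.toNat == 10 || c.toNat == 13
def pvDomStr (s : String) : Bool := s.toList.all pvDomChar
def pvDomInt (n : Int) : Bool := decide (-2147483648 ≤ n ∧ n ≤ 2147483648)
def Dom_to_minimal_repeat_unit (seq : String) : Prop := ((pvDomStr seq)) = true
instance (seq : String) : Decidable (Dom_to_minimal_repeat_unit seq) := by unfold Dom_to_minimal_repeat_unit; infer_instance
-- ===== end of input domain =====

-- ===== PORT A =====
-- B replaces A's per-length chunk-and-set test with a divisor test; return values proved equal.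

-- the chunk list [seq[i : i + j] for i in range(0, len(seq), j)]
def pvTandems (l : List Char) (j : Nat) : List (List Char) :=
  (PySem.List.pyRange 0 (l.length : Int) (j : Int)).map
    (fun i => PySem.List.slice l (some i) (some (i + (j : Int))))

-- the while loop: j keeps increasing while j <= mid and not found
def pvLoopA (l : List Char) (mid : Nat) (j : Nat) : List Char :=
  if j ≤ mid then
    if (PySem.Set.ofList (pvTandems l j)).length = 1 then
      (PySem.Set.ofList (pvTandems l j)).headD []   -- list(set(tandems))[0]: the unique element
    else pvLoopA l mid (j + 1)
  else l
termination_by mid + 1 - j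

def to_minimal_repeat_unit (seq : String) : String :=
  -- mid = int(len(seq) / 2): truncated halving of a Nat length = Nat division
  String.ofList (pvLoopA seq.toList (seq.toList.length / 2) 1)

-- ===== PORT B =====
-- for j in range(1, n // 2 + 1): if n % j == 0 and seq[:j] * (n // j) == seq: return seq[:j]
def pvLoopB (l : List Char) (n : Nat) (j : Nat) : List Char :=
  if j ≤ n / 2 then
    if n % j = 0 ∧ PySem.List.pyRepeat (l.take j) ((n / j : Nat) : Int) = l then l.take j
    else pvLoopB l n (j + 1)
  else l
termination_by n / 2 + 1 - j

def to_minimal_repeat_unit_alt (seq : String) : String :=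
  String.ofList (pvLoopB seq.toList seq.toList.length 1)

-- ===== PRECONDITION & SPEC =====
def Spec_to_minimal_repeat_unit (seq : String) (out : String) : Prop := out = to_minimal_repeat_unit_alt seq
instance (seq : String) (out : String) : Decidable (Spec_to_minimal_repeat_unit seq out) := by unfold Spec_to_minimal_repeat_unit; infer_instance

-- ===== CLAIM (what is proved, stated in full; the proofs are below) =====
def Claim_equal_to_minimal_repeat_unit : Prop := ∀ (seq : String), Dom_to_minimal_repeat_unit seq → Spec_to_minimal_repeat_unit seq (to_minimal_repeat_unit seq)

-- ===== LEMMAS AND PROOFS =====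

theorem pv_foldl_add_fix {α : Type} [BEq α] [LawfulBEq α] (x : α) :
    ∀ xs : List α, (∀ y ∈ xs, y = x) → xs.foldl PySem.Set.add [x] = [x] := by
  intro xs
  induction xs with
  | nil => intro _; rfl
  | cons y ys ih =>
    intro h
    have hy : y = x := h y (by simp)
    have hadd : PySem.Set.add [x] y = [x] := PySem.Set.add_of_mem (by simp [hy])
    rw [List.foldl_cons, hadd]
    exact ih (fun z hz => h z (by simp [hz]))

theorem pv_set_singleton {α : Type} [BEq α] [LawfulBEq α] (x : α) (xs : List α)
    (h : ∀ y ∈ xs, y = x) : PySem.Set.ofList (x :: xs) = [x] := by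
  show (x :: xs).foldl PySem.Set.add PySem.Set.empty = [x]
  rw [List.foldl_cons]
  have h0 : PySem.Set.add PySem.Set.empty x = [x] := rfl
  rw [h0]
  exact pv_foldl_add_fix x xs h

theorem pv_set_len_one_iff {α : Type} [BEq α] [LawfulBEq α] (x : α) (xs : List α) :
    (PySem.Set.ofList (x :: xs)).length = 1 ↔ ∀ y ∈ xs, y = x := by
  constructor
  · intro h1 y hy
    obtain ⟨z, hz⟩ := List.length_eq_one_iff.1 h1
    have hxz : x = z := by
      have hx := (PySem.Set.mem_ofList (xs := x :: xs) (y := x)).2 (by simp)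
      rw [hz] at hx; simpa using hx
    have hyz : y = z := by
      have hy' := (PySem.Set.mem_ofList (xs := x :: xs) (y := y)).2 (by simp [hy])
      rw [hz] at hy'; simpa using hy'
    rw [hyz, hxz]
  · intro h; rw [pv_set_singleton x xs h]; rfl

-- chunk count: ceil(n / j)
def pvCnt (n j : Nat) : Nat := (n + j - 1) / j

theorem pv_cnt_pos (n j : Nat) (hj : 0 < j) (hn : 0 < n) : 0 < pvCnt n j := by
  exact Nat.div_pos (by omega) hj

theorem pv_cnt_of_dvd (n j m : Nat) (hj : 0 < j) (hm : n = j * m) : pvCnt n j = m := by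
  unfold pvCnt
  have h1 : n + j - 1 = j * m + (j - 1) := by omega
  rw [h1, Nat.mul_add_div hj]
  have h2 : (j - 1) / j = 0 := Nat.div_eq_of_lt (by omega)
  omega

theorem pv_cnt_of_not_dvd (n j : Nat) (hj : 0 < j) (hr : n % j ≠ 0) :
    pvCnt n j = n / j + 1 := by
  unfold pvCnt
  have hdm : j * (n / j) + n % j = n := Nat.div_add_mod n j
  have hrlt : n % j < j := Nat.mod_lt n hj
  have hmul : j * (n / j + 1) = j * (n / j) + j := by ring
  have h1 : n + j - 1 = j * (n / j) + j + (n % j - 1) := by omega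
  rw [h1, ← hmul, Nat.mul_add_div hj]
  have h2 : (n % j - 1) / j = 0 := Nat.div_eq_of_lt (by omega)
  omega

theorem pv_tandems_eq (l : List Char) (j : Nat) (hj : 0 < j) :
    pvTandems l j = (List.range (pvCnt l.length j)).map (fun k => (l.drop (j * k)).take j) := by
  unfold pvTandems
  rw [PySem.List.pyRange_of_pos 0 (l.length : Int) (by exact_mod_cast hj), List.map_map]
  have hC : (if (0 : Int) < (l.length : Int) then
      (((l.length : Int) - 0 + (j : Int) - 1) / (j : Int)).toNat else 0) = pvCnt l.length j := by
    by_cases hn : 0 < l.length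
    · have hlt : (0 : Int) < (l.length : Int) := by exact_mod_cast hn
      rw [if_pos hlt]
      have h1 : ((l.length : Int) - 0 + (j : Int) - 1) = ((l.length + j - 1 : Nat) : Int) := by
        omega
      rw [h1]
      rfl
    · have : l.length = 0 := by omega
      rw [this]
      simp [pvCnt, Nat.div_eq_of_lt (by omega : j - 1 < j)]
  rw [hC]
  apply List.map_congr_left
  intro k _
  show PySem.List.slice l (some (0 + (j : Int) * (k : Int))) (some (0 + (j : Int) * (k : Int) + (j : Int))) = _
  have h2 : (0 + (j : Int) * (k : Int)) = ((j * k : Nat) : Int) := by push_cast; ring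
  rw [h2, PySem.List.slice_natCast_add]

theorem pv_flatten_chunk (c : List Char) (j : Nat) (hc : c.length = j) :
    ∀ (k m : Nat), k < m → (((List.replicate m c).flatten.drop (j * k)).take j) = c := by
  intro k
  induction k with
  | zero =>
    intro m hm
    obtain ⟨m', rfl⟩ := Nat.exists_eq_succ_of_ne_zero (by omega : m ≠ 0)
    rw [List.replicate_succ, List.flatten_cons, Nat.mul_zero, List.drop_zero, ← hc,
      List.take_left]
  | succ k ih =>
    intro m hm
    obtain ⟨m', rfl⟩ := Nat.exists_eq_succ_of_ne_zero (by omega : m ≠ 0)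
    rw [List.replicate_succ, List.flatten_cons]
    have h1 : j * (k + 1) = c.length + j * k := by rw [hc]; ring
    rw [h1, List.drop_length_add_append]
    exact ih m' (by omega)

theorem pv_chunks_to_flatten (j : Nat) (hj : 0 < j) (c : List Char) (hc : c.length = j) :
    ∀ (m : Nat) (l' : List Char), l'.length = j * m →
      (∀ k < m, (l'.drop (j * k)).take j = c) → l' = (List.replicate m c).flatten := by
  intro m
  induction m with
  | zero =>
    intro l' hl _
    rw [Nat.mul_zero] at hl
    simp [List.eq_nil_of_length_eq_zero hl]
  | succ m ih =>
    intro l' hl hch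
    have h0 : l'.take j = c := by
      have := hch 0 (by omega)
      simpa using this
    have hmul : j * (m + 1) = j * m + j := by ring
    have hrest : (l'.drop j).length = j * m := by
      rw [List.length_drop, hl]; omega
    have htail : l'.drop j = (List.replicate m c).flatten := by
      apply ih (l'.drop j) hrest
      intro k hk
      have h2 := hch (k + 1) (by omega)
      have h3 : j * (k + 1) = j + j * k := by ring
      rw [List.drop_drop, ← h3]
      exact h2
    calc l' = l'.take j ++ l'.drop j := (List.take_append_drop j l').symm
      _ = c ++ (List.replicate m c).flatten := by rw [h0, htail]
      _ = (List.replicate (m + 1) c).flatten := by rw [List.replicate_succ, List.flatten_cons]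

theorem pv_chunks_iff (l : List Char) (j : Nat) (hj : 0 < j) (h2 : 2 * j ≤ l.length) :
    (∀ k < pvCnt l.length j, (l.drop (j * k)).take j = l.take j) ↔
      (l.length % j = 0 ∧ (List.replicate (l.length / j) (l.take j)).flatten = l) := by
  have hjn : j ≤ l.length := by omega
  have hc : (l.take j).length = j := by
    rw [List.length_take]; omega
  have hdm : j * (l.length / j) + l.length % j = l.length := Nat.div_add_mod l.length j
  constructor
  · intro H
    have hr0 : l.length % j = 0 := by
      by_contra hr
      have hcnt := pv_cnt_of_not_dvd l.length j hj hr
      have hch := H (l.length / j) (by omega)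
      have hlen := congrArg List.length hch
      rw [List.length_take, List.length_drop, hc] at hlen
      have hrlt : l.length % j < j := Nat.mod_lt l.length hj
      omega
    have hn : l.length = j * (l.length / j) := by omega
    have hcnt := pv_cnt_of_dvd l.length j (l.length / j) hj hn
    refine ⟨hr0, ?_⟩
    exact (pv_chunks_to_flatten j hj (l.take j) hc (l.length / j) l hn
      (fun k hk => H k (by omega))).symm
  · rintro ⟨hr0, hfl⟩
    have hn : l.length = j * (l.length / j) := by omega
    have hcnt := pv_cnt_of_dvd l.length j (l.length / j) hj hn
    have hmpos : 0 < l.length / j := by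
      rcases Nat.eq_zero_or_pos (l.length / j) with h | h
      · rw [h, Nat.mul_zero] at hn; omega
      · exact h
    intro k hk
    rw [hcnt] at hk
    have hk0 := pv_flatten_chunk (l.take j) j hc k (l.length / j) hk
    rw [hfl] at hk0
    exact hk0

theorem pv_tandems_cons (l : List Char) (j : Nat) (hj : 0 < j) (hn : 0 < l.length) :
    pvTandems l j = l.take j ::
      (List.range (pvCnt l.length j - 1)).map (fun k => (l.drop (j * (k + 1))).take j) := by
  rw [pv_tandems_eq l j hj]
  have hpos := pv_cnt_pos l.length j hj hn
  obtain ⟨c', hc'⟩ := Nat.exists_eq_succ_of_ne_zero (by omega : pvCnt l.length j ≠ 0)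
  rw [hc', List.range_succ_eq_map, List.map_cons, List.map_map, Nat.succ_sub_one]
  congr 1

theorem pv_cond_iff (l : List Char) (j : Nat) (hj : 0 < j) (h2 : j ≤ l.length / 2) :
    (PySem.Set.ofList (pvTandems l j)).length = 1 ↔
      (l.length % j = 0 ∧ (List.replicate (l.length / j) (l.take j)).flatten = l) := by
  have h2' : 2 * j ≤ l.length := by
    have := (Nat.le_div_iff_mul_le (by omega : 0 < 2)).1 h2
    omega
  have hn : 0 < l.length := by omega
  rw [pv_tandems_cons l j hj hn, pv_set_len_one_iff]
  rw [← pv_chunks_iff l j hj h2']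
  have hpos := pv_cnt_pos l.length j hj hn
  constructor
  · intro h k hk
    cases k with
    | zero => rw [Nat.mul_zero, List.drop_zero]
    | succ k =>
      exact h _ (List.mem_map.2 ⟨k, List.mem_range.2 (by omega), rfl⟩)
  · intro h y hy
    obtain ⟨k, hk, rfl⟩ := List.mem_map.1 hy
    exact h (k + 1) (by have := List.mem_range.1 hk; omega)

theorem pv_condA_val (l : List Char) (j : Nat) (hj : 0 < j) (h2 : j ≤ l.length / 2)
    (h : (PySem.Set.ofList (pvTandems l j)).length = 1) :
    (PySem.Set.ofList (pvTandems l j)).headD [] = l.take j := by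
  have hn : 0 < l.length := by
    have := (Nat.le_div_iff_mul_le (by omega : 0 < 2)).1 h2
    omega
  rw [pv_tandems_cons l j hj hn] at h ⊢
  have hall := (pv_set_len_one_iff _ _).1 h
  rw [pv_set_singleton _ _ hall]
  rfl

theorem pv_loops_eq (l : List Char) :
    ∀ (d j : Nat), 0 < j → l.length / 2 + 1 - j = d →
      pvLoopA l (l.length / 2) j = pvLoopB l l.length j := by
  intro d
  induction d with
  | zero =>
    intro j hj hd
    rw [pvLoopA, pvLoopB]
    have hle : ¬ j ≤ l.length / 2 := by omega
    simp [hle]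
  | succ d ih =>
    intro j hj hd
    rw [pvLoopA, pvLoopB]
    by_cases hle : j ≤ l.length / 2
    · simp only [hle, if_true]
      have hiff := pv_cond_iff l j hj hle
      by_cases hcA : (PySem.Set.ofList (pvTandems l j)).length = 1
      · have hb := hiff.1 hcA
        have hcB : (l.length % j = 0 ∧
            PySem.List.pyRepeat (l.take j) ((l.length / j : Nat) : Int) = l) := by
          refine ⟨hb.1, ?_⟩
          show (List.replicate ((l.length / j : Nat) : Int).toNat (l.take j)).flatten = l
          rw [Int.toNat_natCast]
          exact hb.2
        rw [if_pos hcA, if_pos hcB]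
        exact pv_condA_val l j hj hle hcA
      · have hcB : ¬ (l.length % j = 0 ∧
            PySem.List.pyRepeat (l.take j) ((l.length / j : Nat) : Int) = l) := by
          rintro ⟨h1, h4⟩
          apply hcA
          apply hiff.2
          refine ⟨h1, ?_⟩
          have : (List.replicate ((l.length / j : Nat) : Int).toNat (l.take j)).flatten = l := h4
          rwa [Int.toNat_natCast] at this
        rw [if_neg hcA, if_neg hcB]
        exact ih (j + 1) (by omega) (by omega)
    · simp [hle]

-- ===== VERDICT (by name: the statement is the Claim_ definition above) =====
theorem to_minimal_repeat_unit_spec : Claim_equal_to_minimal_repeat_unit := by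
  intro seq _
  unfold Spec_to_minimal_repeat_unit to_minimal_repeat_unit to_minimal_repeat_unit_alt
  rw [pv_loops_eq seq.toList (seq.toList.length / 2 + 1 - 1) 1 (by omega) rfl]
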